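-- pv_equiv track=rewrite | github.com/tomulanovski/gene2net | simulations/scripts/process_gene_trees_for_grampa.py | reformat_for_grampa
-- ===== SOURCE A (Python) =====
-- from collections import defaultdict
--
-- def reformat_for_grampa(tree_string):
--     """Add copy numbers to taxa for GRAMPA format (e.g., 1_species, 2_species)."""
--     taxa_counts = defaultdict(int)
--     result = []
--     i = 0
--
--     while i < len(tree_string):
--         char = tree_string[i]
--
--         # Check if we're at the start of a taxon name (letter or digit)
--         if char.isalnum():
--             # Check if this position could be a taxon (after '(' or ',')
--             if i == 0 or tree_string[i-1] in '(,':
--                 # Extract the full taxon name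
--                 taxon = ''
--                 j = i
--                 while j < len(tree_string) and (tree_string[j].isalnum() or tree_string[j] == '_'):
--                     taxon += tree_string[j]
--                     j += 1
--
--                 # Increment count and add reformatted name
--                 taxa_counts[taxon] += 1
--                 result.append(f"{taxa_counts[taxon]}_{taxon}")
--                 i = j
--                 continue
--
--         result.append(char)
--         i += 1
--
--     return ''.join(result)
-- ===== SOURCE B (Python) =====
-- from collections import defaultdict
--
-- def _pieces(s):
--     """Split s into pieces separated by '(' and ',', yielding each delimiter as its own piece."""
--     seg = []
--     for ch in s:
--         if ch in '(,':
--             yield ''.join(seg)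
--             yield ch
--             seg = []
--         else:
--             seg.append(ch)
--     yield ''.join(seg)
--
-- def reformat_for_grampa(tree_string):
--     """Add copy numbers to taxa for GRAMPA format (e.g., 1_species, 2_species)."""
--     counts = defaultdict(int)
--     parts = []
--     for piece in _pieces(tree_string):
--         if piece and piece[0].isalnum():
--             k = next((idx for idx, ch in enumerate(piece)
--                       if not (ch.isalnum() or ch == '_')), len(piece))
--             name = piece[:k]
--             counts[name] += 1
--             parts.append(f"{counts[name]}_{name}{piece[k:]}")
--         else:
--             parts.append(piece)
--     return ''.join(parts)
-- ===== Notes on version B (the rewrite author's own statement) =====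
-- stated objective: faster
-- what changed: Replaces A's index-advancing outer/inner while loops (which build each taxon by repeated string concatenation) by a single split pass on the two delimiter characters that yields segments, then a uniform per-piece slice-based rewrite of the leading word-prefix via a counter dict.
import Mathlib
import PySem

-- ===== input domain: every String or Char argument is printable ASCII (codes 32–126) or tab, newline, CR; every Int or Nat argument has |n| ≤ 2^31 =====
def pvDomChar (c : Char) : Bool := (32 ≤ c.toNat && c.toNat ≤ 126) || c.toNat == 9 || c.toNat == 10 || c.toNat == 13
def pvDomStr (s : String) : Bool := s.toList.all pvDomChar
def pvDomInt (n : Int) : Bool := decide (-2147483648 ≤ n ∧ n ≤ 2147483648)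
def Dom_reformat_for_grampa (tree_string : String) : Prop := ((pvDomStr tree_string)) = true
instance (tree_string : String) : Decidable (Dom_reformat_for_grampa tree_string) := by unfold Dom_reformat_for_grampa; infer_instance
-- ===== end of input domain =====

-- B replaces A's index-advancing double loop (char-by-char taxon concatenation) by one split
-- pass on the delimiters plus a slice-based rewrite of each piece's leading word-prefix
-- (measurably faster on large inputs; return value only).

-- ===== PORT A =====
-- word character test of A's inner while: tree_string[j].isalnum() or tree_string[j] == '_'
def pvWordA (c : Char) : Bool := PySem.Chars.isalnum c || c == '_'

-- inner while: extract the full taxon name starting at j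
def pvInnerA (s : List Char) (j : Nat) (taxon : List Char) : List Char × Nat :=
  if h : j < s.length then
    if pvWordA s[j] then pvInnerA s (j + 1) (taxon ++ [s[j]])
    else (taxon, j)
  else (taxon, j)
termination_by s.length - j

-- outer while over i (fuel = remaining characters; i advances by ≥ 1 each step)
def pvLoopA (s : List Char) (fuel i : Nat) (counts : PySem.Dict String Int)
    (result : List (List Char)) : List (List Char) :=
  match fuel with
  | 0 => result
  | fuel + 1 =>
    if h : i < s.length then
      let char := s[i]
      if PySem.Chars.isalnum char &&
          (i == 0 || (s[i - 1]'(Nat.lt_of_le_of_lt (Nat.pred_le i) h) == '(' ||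
                      s[i - 1]'(Nat.lt_of_le_of_lt (Nat.pred_le i) h) == ',')) then
        let p := pvInnerA s i []
        let name := String.ofList p.1
        let counts' := counts.insert name (counts.getD name 0 + 1)
        pvLoopA s fuel p.2 counts'
          (result ++ [PySem.Int.toChars (counts'.getD name 0) ++ '_' :: p.1])
      else
        pvLoopA s fuel (i + 1) counts (result ++ [[char]])
    else result

def reformat_for_grampa (tree_string : String) : String :=
  String.ofList (pvLoopA tree_string.toList tree_string.toList.length 0 PySem.Dict.empty []).flatten

-- ===== PORT B =====
-- _pieces: split on '(' and ',', yielding each delimiter as its own piece (loop state = (pieces so far, current seg))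
def pvPiecesStep (st : List (List Char) × List Char) (ch : Char) : List (List Char) × List Char :=
  if ch == '(' || ch == ',' then (st.1 ++ [st.2, [ch]], [])
  else (st.1, st.2 ++ [ch])

def pvPieces (s : List Char) : List (List Char) :=
  let st := s.foldl pvPiecesStep ([], [])
  st.1 ++ [st.2]

-- loop body over pieces (state = (counts, parts))
def pvPieceStep (st : PySem.Dict String Int × List (List Char)) (piece : List Char) :
    PySem.Dict String Int × List (List Char) :=
  match piece with
  | [] => (st.1, st.2 ++ [[]])
  | c :: _ =>
    if PySem.Chars.isalnum c then
      let k := piece.findIdx (fun ch => !(PySem.Chars.isalnum ch || ch == '_'))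
      let name := String.ofList (piece.take k)
      let counts := st.1.insert name (st.1.getD name 0 + 1)
      (counts, st.2 ++ [PySem.Int.toChars (counts.getD name 0) ++ '_' :: piece.take k ++ piece.drop k])
    else (st.1, st.2 ++ [piece])

def reformat_for_grampa_alt (tree_string : String) : String :=
  String.ofList ((pvPieces tree_string.toList).foldl pvPieceStep (PySem.Dict.empty, [])).2.flatten

-- ===== PRECONDITION & SPEC =====
def Spec_reformat_for_grampa (tree_string : String) (out : String) : Prop := out = reformat_for_grampa_alt tree_string
instance (tree_string : String) (out : String) : Decidable (Spec_reformat_for_grampa tree_string out) := by unfold Spec_reformat_for_grampa; infer_instance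

-- ===== CLAIM (what is proved, stated in full; the proofs are below) =====
def Claim_equal_reformat_for_grampa : Prop := ∀ (tree_string : String), Dom_reformat_for_grampa tree_string → Spec_reformat_for_grampa tree_string (reformat_for_grampa tree_string)

-- ===== LEMMAS AND PROOFS =====

def pvDelim (c : Char) : Bool := c == '(' || c == ','

-- common intermediate form of both programs: scan with a boundary flag
def pvCanon (counts : PySem.Dict String Int) (bnd : Bool) : List Char → List (List Char)
  | [] => []
  | c :: rest =>
    if h : bnd && PySem.Chars.isalnum c then
      let t := (c :: rest).takeWhile pvWordA
      let name := String.ofList t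
      let counts' := counts.insert name (counts.getD name 0 + 1)
      (PySem.Int.toChars (counts'.getD name 0) ++ '_' :: t) ::
        pvCanon counts' false ((c :: rest).dropWhile pvWordA)
    else [c] :: pvCanon counts (pvDelim c) rest
termination_by l => l.length
decreasing_by
  · simp only [List.dropWhile_cons]
    have hw : pvWordA c = true := by
      cases bnd <;> simp_all [pvWordA]
    simp only [hw, if_pos]
    exact Nat.lt_succ_of_le (List.length_dropWhile_le _ _)
  · simp

lemma pvWordA_not_delim {c : Char} (h : pvWordA c = true) : pvDelim c = false := by
  by_contra hd
  have hd' : c = '(' ∨ c = ',' := by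
    simpa [pvDelim] using Bool.of_not_eq_false hd
  rcases hd' with rfl | rfl <;> exact absurd h (by decide)

-- A's inner while extracts the maximal pvWordA-run
lemma pvLen_takeWhile (p : Char → Bool) (l : List Char) :
    (l.takeWhile p).length = l.findIdx (fun a => !p a) := by
  -- small general fact; no named Mathlib lemma states it (cf. takeWhile_eq_take_findIdx_not)
  induction l with
  | nil => simp
  | cons c t ih => by_cases h : p c <;> simp [List.findIdx_cons, h, ih]

lemma pvDropWhile_drop (p : Char → Bool) (l : List Char) :
    l.dropWhile p = l.drop (l.takeWhile p).length := by
  rw [pvLen_takeWhile]; exact List.dropWhile_eq_drop_findIdx_not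

lemma pvInnerA_spec (s : List Char) (j : Nat) (acc : List Char) :
    pvInnerA s j acc = (acc ++ (s.drop j).takeWhile pvWordA, j + ((s.drop j).takeWhile pvWordA).length) := by
  fun_induction pvInnerA s j acc with
  | case1 j acc h hw ih =>
    rw [ih]
    have hd : s.drop j = s[j] :: s.drop (j + 1) := (List.getElem_cons_drop h).symm
    rw [hd, List.takeWhile_cons, hw]
    simp; omega
  | case2 j acc h hw =>
    have hw' : pvWordA s[j] = false := by simpa using hw
    have hd : s.drop j = s[j] :: s.drop (j + 1) := (List.getElem_cons_drop h).symm
    rw [hd, List.takeWhile_cons, hw']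
    simp
  | case3 j acc h =>
    have hd : s.drop j = [] := List.drop_eq_nil_of_le (by omega)
    simp [hd]

-- A's outer loop equals pvCanon on the remaining suffix
lemma pvLoopA_spec (s : List Char) (fuel : Nat) :
    ∀ i counts result, s.length ≤ fuel + i →
      pvLoopA s fuel i counts result =
        result ++ pvCanon counts ((i == 0) || pvDelim (s.getD (i - 1) ' ')) (s.drop i) := by
  induction fuel with
  | zero =>
    intro i counts result hle
    have hd : s.drop i = [] := List.drop_eq_nil_of_le (by omega)
    simp [pvLoopA, hd, pvCanon]
  | succ fuel ih =>
    intro i counts result hle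
    by_cases h : i < s.length
    · have hdropi : s.drop i = s[i] :: s.drop (i + 1) := (List.getElem_cons_drop h).symm
      have hbnd : (PySem.Chars.isalnum s[i] &&
          ((i == 0) || (s[i - 1]'(Nat.lt_of_le_of_lt (Nat.pred_le i) h) == '(' ||
                        s[i - 1]'(Nat.lt_of_le_of_lt (Nat.pred_le i) h) == ','))) =
          (((i == 0) || pvDelim (s.getD (i - 1) ' ')) && PySem.Chars.isalnum s[i]) := by
        have hgetD : s.getD (i - 1) ' ' = s[i - 1]'(Nat.lt_of_le_of_lt (Nat.pred_le i) h) :=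
          List.getD_eq_getElem s ' ' (Nat.lt_of_le_of_lt (Nat.pred_le i) h)
        by_cases hi : i = 0
        · subst hi; simp [Bool.and_comm]
        · simp only [hgetD, pvDelim, beq_iff_eq, hi]
          cases PySem.Chars.isalnum s[i] <;> simp [Bool.and_comm, Bool.or_comm]
      simp only [pvLoopA, dif_pos h]
      rw [hbnd, hdropi, pvCanon, ← hdropi]
      by_cases hcond : (((i == 0) || pvDelim (s.getD (i - 1) ' ')) && PySem.Chars.isalnum s[i]) = true
      · rw [if_pos hcond, dif_pos hcond]
        rw [pvInnerA_spec]
        set tw := (s.drop i).takeWhile pvWordA with htw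
        set k := tw.length with hk
        have halnum : PySem.Chars.isalnum s[i] = true := (Bool.and_eq_true_iff.mp hcond).2
        have hw0 : pvWordA s[i] = true := by simp [pvWordA, halnum]
        have hk1 : 1 ≤ k := by
          rw [hk, htw, hdropi, List.takeWhile_cons, hw0]
          simp
        have hkle : i + k ≤ s.length := by
          have := (List.takeWhile_prefix pvWordA (l := s.drop i)).length_le
          rw [← htw, ← hk] at this
          simp at this; omega
      
        have hlast : pvWordA (s.getD (i + k - 1) ' ') = true := by
          have hlt : i + k - 1 < s.length := by omega
          have hlt2 : k - 1 < (s.drop i).length := by simp; omega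
          have hlt3 : k - 1 < tw.length := by omega
          rw [List.getD_eq_getElem s ' ' hlt]
          have he1 : tw[k - 1]'hlt3 = (s.drop i)[k - 1]'hlt2 :=
            (List.takeWhile_prefix pvWordA).getElem hlt3
          have he2 : (s.drop i)[k - 1]'hlt2 = s[i + (k - 1)]'(by omega) := List.getElem_drop ..
          have : s[i + k - 1]'hlt = tw[k - 1]'hlt3 := by
            rw [he1, he2]; congr 1; omega
          rw [this]
          exact List.mem_takeWhile_imp (List.getElem_mem hlt3)
        have hbnd' : (((i + k) == 0) || pvDelim (s.getD (i + k - 1) ' ')) = false := by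
          have h1 : ((i + k) == 0) = false := by simp; omega
          rw [h1, pvWordA_not_delim hlast]
          simp
        rw [ih (i + k) _ _ (by omega), hbnd']
        have hdw : (s.drop i).dropWhile pvWordA = s.drop (i + k) := by
          rw [pvDropWhile_drop, ← htw, ← hk, List.drop_drop]
        rw [hdw]
        simp
      · rw [if_neg hcond, dif_neg (by simpa using hcond)]
        have hbnd' : (((i + 1) == 0) || pvDelim (s.getD (i + 1 - 1) ' ')) = pvDelim s[i] := by
          rw [List.getD_eq_getElem s ' ' (by simpa using h)]
          simp
        rw [ih (i + 1) _ _ (by omega), hbnd']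
        simp
    · have hd : s.drop i = [] := List.drop_eq_nil_of_le (by omega)
      rw [pvLoopA, dif_neg h, hd]
      simp [pvCanon]

-- B's split pass: recursive characterisation
def pvSplit : List Char → List (List Char)
  | [] => [[]]
  | c :: rest =>
    if pvDelim c then [] :: [c] :: pvSplit rest
    else
      match pvSplit rest with
      | s :: ss => (c :: s) :: ss
      | [] => [[c]]

def pvConsHead (cur : List Char) : List (List Char) → List (List Char)
  | [] => [cur]
  | s :: ss => (cur ++ s) :: ss

lemma pvSplit_ne_nil (l : List Char) : pvSplit l ≠ [] := by
  cases l with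
  | nil => simp [pvSplit]
  | cons c rest =>
    rw [pvSplit]
    split
    · simp
    · cases h : pvSplit rest <;> simp

lemma pvPieces_foldl (l : List Char) :
    ∀ acc cur, (let st := l.foldl pvPiecesStep (acc, cur); st.1 ++ [st.2]) =
      acc ++ pvConsHead cur (pvSplit l) := by
  induction l with
  | nil => intro acc cur; simp [pvSplit, pvConsHead]
  | cons c rest ih =>
    intro acc cur
    by_cases hc : pvDelim c
    · have : pvPiecesStep (acc, cur) c = (acc ++ [cur, [c]], []) := by
        simp [pvPiecesStep]; simp [pvDelim] at hc; tauto
      simp only [List.foldl_cons, this, pvSplit]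
      rw [ih]
      cases h : pvSplit rest with
      | nil => exact absurd h (pvSplit_ne_nil rest)
      | cons s ss => simp [hc, pvConsHead, h]
    · have : pvPiecesStep (acc, cur) c = (acc, cur ++ [c]) := by
        simp [pvPiecesStep]; simp [pvDelim] at hc; tauto
      simp only [List.foldl_cons, this, pvSplit]
      rw [ih]
      cases h : pvSplit rest with
      | nil => exact absurd h (pvSplit_ne_nil rest)
      | cons s ss => simp [hc, pvConsHead, h]

lemma pvPieces_eq_split (l : List Char) : pvPieces l = pvSplit l := by
  have := pvPieces_foldl l [] []
  cases h : pvSplit l with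
  | nil => exact absurd h (pvSplit_ne_nil l)
  | cons s ss => simpa [pvPieces, pvConsHead, h] using this

-- B's piece loop: recursive characterisation of the parts it appends
def pvProc (counts : PySem.Dict String Int) : List (List Char) → List (List Char)
  | [] => []
  | p :: ps =>
    let st := pvPieceStep (counts, []) p
    st.2 ++ pvProc st.1 ps

lemma pvPieceStep_parts (counts : PySem.Dict String Int) (parts : List (List Char)) (p : List Char) :
    pvPieceStep (counts, parts) p =
      ((pvPieceStep (counts, []) p).1, parts ++ (pvPieceStep (counts, []) p).2) := by
  cases p with
  | nil => simp [pvPieceStep]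
  | cons c rest => by_cases h : PySem.Chars.isalnum c <;> simp [pvPieceStep, h]

lemma pvProc_foldl (ps : List (List Char)) :
    ∀ counts parts, (ps.foldl pvPieceStep (counts, parts)).2 = parts ++ pvProc counts ps := by
  induction ps with
  | nil => intro counts parts; simp [pvProc]
  | cons p ps ih =>
    intro counts parts
    simp only [List.foldl_cons, pvProc]
    rw [pvPieceStep_parts, ih]
    simp

-- splitting l at the first delimiter
lemma pvSplit_decomp (l : List Char) :
    pvSplit l = l.takeWhile (fun c => !pvDelim c) ::
      (match l.dropWhile (fun c => !pvDelim c) with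
       | [] => []
       | d :: r' => [d] :: pvSplit r') := by
  induction l with
  | nil => simp [pvSplit]
  | cons c rest ih =>
    by_cases hc : pvDelim c
    · have hrest : (c :: rest).dropWhile (fun c => !pvDelim c) = c :: rest := by
        simp [List.dropWhile_cons, hc]
      rw [pvSplit]
      simp [hc, hrest]
    · have htake : (c :: rest).takeWhile (fun c => !pvDelim c) =
          c :: rest.takeWhile (fun c => !pvDelim c) := by
        simp [List.takeWhile_cons, hc]
      have hdrop : (c :: rest).dropWhile (fun c => !pvDelim c) =
          rest.dropWhile (fun c => !pvDelim c) := by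
        simp [List.dropWhile_cons, hc]
      rw [pvSplit]
      simp only [hc, ih, htake, hdrop]
      simp

-- canon copies a delimiter-free run when the boundary flag is off
lemma pvCanon_copy (tail : List Char) (h : ∀ c ∈ tail, pvDelim c = false) :
    ∀ counts rest, pvCanon counts false (tail ++ rest) =
      tail.map (fun c => [c]) ++ pvCanon counts false rest := by
  induction tail with
  | nil => intro counts rest; simp
  | cons c tail' ih =>
    intro counts rest
    have hc : pvDelim c = false := h c (by simp)
    rw [List.cons_append, pvCanon, dif_neg (by simp), hc,
        ih (fun x hx => h x (by simp [hx]))]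
    simp

lemma pvDelim_not_alnum {c : Char} (h : pvDelim c = true) : PySem.Chars.isalnum c = false := by
  rcases (by simpa [pvDelim] using h : c = '(' ∨ c = ',') with rfl | rfl <;> decide

lemma pvDelim_not_word {c : Char} (h : pvDelim c = true) : pvWordA c = false := by
  rcases (by simpa [pvDelim] using h : c = '(' ∨ c = ',') with rfl | rfl <;> decide

-- a non-alnum head is copied whatever the boundary flag is
lemma pvCanon_not_alnum {d : Char} (hd : PySem.Chars.isalnum d = false)
    (counts : PySem.Dict String Int) (b : Bool) (r : List Char) :
    pvCanon counts b (d :: r) = [d] :: pvCanon counts (pvDelim d) r := by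
  rw [pvCanon, dif_neg (by simp [hd])]

-- takeWhile/dropWhile stop at an appended failing head (specialisations of List.takeWhile_append/dropWhile_append)
lemma pvTW_append (p : Char → Bool) (xs : List Char) {d : Char} {r : List Char} (hd : p d = false) :
    (xs ++ d :: r).takeWhile p = xs.takeWhile p := by
  rw [List.takeWhile_append]
  split_ifs with h
  · rw [(List.takeWhile_prefix p).eq_of_length h]
    simp [List.takeWhile_cons, hd]
  · rfl

lemma pvDW_append (p : Char → Bool) (xs : List Char) {d : Char} {r : List Char} (hd : p d = false) :
    (xs ++ d :: r).dropWhile p = xs.dropWhile p ++ d :: r := by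
  rw [List.dropWhile_append]
  split_ifs with h
  · have h' : xs.dropWhile p = [] := by simpa using h
    rw [List.dropWhile_cons, hd]
    simp [h']
  · rfl

-- one segment (delimiter-free), followed by nothing or a delimiter-headed rest
lemma pvFlatten_single (l : List Char) : (l.map (fun c => [c])).flatten = l := by
  induction l <;> simp_all

lemma pvPieceStep_delim {d : Char} (hd : pvDelim d = true)
    (x : PySem.Dict String Int) (parts : List (List Char)) :
    pvPieceStep (x, parts) [d] = (x, parts ++ [[d]]) := by
  simp [pvPieceStep, pvDelim_not_alnum hd]

lemma pvSeg_canon (seg : List Char) (hseg : ∀ c ∈ seg, pvDelim c = false)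
    (rest : List Char) (hrest : ∀ d r', rest = d :: r' → pvWordA d = false)
    (counts : PySem.Dict String Int) :
    (pvCanon counts true (seg ++ rest)).flatten =
      ((pvPieceStep (counts, []) seg).2).flatten ++
        (pvCanon (pvPieceStep (counts, []) seg).1 false rest).flatten := by
  cases seg with
  | nil =>
    simp only [List.nil_append, pvPieceStep]
    rcases rest with _ | ⟨d, r'⟩
    · simp [pvCanon]
    · have hwd : pvWordA d = false := hrest d r' rfl
      have hda : PySem.Chars.isalnum d = false := by
        by_contra hh
        simp [pvWordA, Bool.of_not_eq_false hh] at hwd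
      rw [pvCanon_not_alnum hda, pvCanon_not_alnum hda]
      simp
  | cons c s' =>
    have hcd : pvDelim c = false := hseg c (by simp)
    by_cases hc : PySem.Chars.isalnum c = true
    · -- taxon piece
      have hfi : (fun ch => !(PySem.Chars.isalnum ch || ch == '_')) = (fun ch => !pvWordA ch) := by
        funext ch; rw [pvWordA]
      have htk : (c :: s').take ((c :: s').findIdx (fun ch => !(PySem.Chars.isalnum ch || ch == '_'))) =
          (c :: s').takeWhile pvWordA := by
        rw [hfi]; exact List.takeWhile_eq_take_findIdx_not.symm
      have hdk : (c :: s').drop ((c :: s').findIdx (fun ch => !(PySem.Chars.isalnum ch || ch == '_'))) =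
          (c :: s').dropWhile pvWordA := by
        rw [hfi]; exact List.dropWhile_eq_drop_findIdx_not.symm
      have htwrest : ((c :: s') ++ rest).takeWhile pvWordA = (c :: s').takeWhile pvWordA := by
        rcases rest with _ | ⟨d, r'⟩
        · simp
        · exact pvTW_append pvWordA (c :: s') (hrest d r' rfl)
      have hdwrest : ((c :: s') ++ rest).dropWhile pvWordA = (c :: s').dropWhile pvWordA ++ rest := by
        rcases rest with _ | ⟨d, r'⟩
        · simp
        · exact pvDW_append pvWordA (c :: s') (hrest d r' rfl)
      have hdwmem : ∀ x ∈ (c :: s').dropWhile pvWordA, pvDelim x = false :=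
        fun x hx => hseg x ((List.dropWhile_sublist pvWordA).mem hx)
      rw [show (c :: s') ++ rest = c :: (s' ++ rest) by simp, pvCanon,
          dif_pos (by simp [hc]), show c :: (s' ++ rest) = (c :: s') ++ rest by simp,
          htwrest, hdwrest]
      simp only [pvCanon_copy _ hdwmem]
      simp only [pvPieceStep, if_pos hc, htk, hdk]
      simp [pvFlatten_single, ← List.append_assoc, List.takeWhile_append_dropWhile]
    · -- copied piece
      have hcf : PySem.Chars.isalnum c = false := by simpa using hc
      have hs'mem : ∀ x ∈ s', pvDelim x = false := fun x hx => hseg x (by simp [hx])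
      rw [show (c :: s') ++ rest = c :: (s' ++ rest) by simp,
          pvCanon_not_alnum hcf, hcd, pvCanon_copy _ hs'mem]
      simp only [pvPieceStep, if_neg hc]
      simp [pvFlatten_single]

-- master lemma: B's piece processing equals pvCanon
lemma pvProc_eq_canon : ∀ n (l : List Char) counts, l.length ≤ n →
    (pvProc counts (pvSplit l)).flatten = (pvCanon counts true l).flatten := by
  intro n
  induction n with
  | zero =>
    intro l counts hle
    have hnil : l = [] := List.eq_nil_of_length_eq_zero (by omega)
    subst hnil
    simp [pvSplit, pvProc, pvPieceStep, pvCanon]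
  | succ n ih =>
    intro l counts hle
    have hl : l.takeWhile (fun c => !pvDelim c) ++ l.dropWhile (fun c => !pvDelim c) = l :=
      List.takeWhile_append_dropWhile
    have hsegmem : ∀ c ∈ l.takeWhile (fun c => !pvDelim c), pvDelim c = false :=
      fun c hc => by simpa using List.mem_takeWhile_imp hc
    rcases hr : l.dropWhile (fun c => !pvDelim c) with _ | ⟨d, r'⟩
    · -- no delimiter in l: one piece
      rw [pvSplit_decomp l, hr]
      rw [hr] at hl
      conv_rhs => rw [← hl]
      rw [pvSeg_canon _ hsegmem [] (by intro d r' h; cases h) counts]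
      simp [pvProc, pvCanon]
    · -- l = seg ++ d :: r' with d a delimiter
      have hdne : l.dropWhile (fun c => !pvDelim c) ≠ [] := by rw [hr]; simp
      have hdd : pvDelim d = true := by
        have := List.head_dropWhile_not (w := hdne)
        simpa [hr] using this
      have hda : PySem.Chars.isalnum d = false := pvDelim_not_alnum hdd
      rw [hr] at hl
      have hlen : r'.length ≤ n := by
        have := congrArg List.length hl
        simp at this
        omega
      rw [pvSplit_decomp l, hr]
      conv_rhs => rw [← hl]
      rw [pvSeg_canon _ hsegmem (d :: r') (by intro d' r'' h; cases h; exact pvDelim_not_word hdd) counts]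
      rw [pvCanon_not_alnum hda, hdd]
      simp only [pvProc]
      rw [pvPieceStep_delim hdd]
      have ihr := fun counts => ih r' counts hlen
      simp [ihr]

-- ===== VERDICT (by name: the statement is the Claim_ definition above) =====
theorem reformat_for_grampa_spec : Claim_equal_reformat_for_grampa := by
  intro s _
  unfold Spec_reformat_for_grampa reformat_for_grampa reformat_for_grampa_alt
  rw [pvLoopA_spec s.toList s.toList.length 0 PySem.Dict.empty [] (by omega),
      pvProc_foldl, pvPieces_eq_split]
  simp [pvProc_eq_canon s.toList.length s.toList PySem.Dict.empty le_rfl]
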